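-- pv_equiv track=rewrite | github.com/rk18venom/-CrackYourPlacement- | Dictionary and HashMap/Tredence Arange Number.py | solve
-- ===== SOURCE A (Python) =====
-- def solve(n, p):
--     p.sort()
--     dict1={}
--     order=[]
--     ans=[]
--     for i in range(n):
--         x, y=p[i][0], p[i][1]
--         if dict1.get(x,0)==0:
--             curr=[]
--             curr.append(p[i])
--             dict1[x]=curr
--             order.append(x)
--         else:
--             curr=dict1[x]
--             curr.append(p[i])
--
--     ans=[]
--     for z in order:
--         curr=dict1[z]
--         curr=sorted(curr, key=lambda x:x[1], reverse=True)
--         ans+=curr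
--     return ans
-- ===== SOURCE B (Python) =====
-- def solve(n, p):
--     # One composite-key sort replaces A's dict grouping, key-order list and
--     # per-group reverse sorts: sort ascending by first element, descending by
--     # second.  p.sort() is kept first so p is mutated exactly as A mutates it
--     # (and so ties between rows with equal (first, second) keys keep A's
--     # lexicographic-ascending order, by stability).  A non-positive n selects
--     # no rows (A's range(n) is empty there).
--     p.sort()
--     return sorted(p[:max(n, 0)], key=lambda e: (e[0], -e[1]))
-- ===== Notes on version B (the rewrite author's own statement) =====
-- stated objective: simpler
-- what changed: A's dict-of-groups, key-order list and per-group reverse sorts are replaced by a single stable composite-key sort (first asc, second desc) of the first n rows of the sorted list.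
import Mathlib
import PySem

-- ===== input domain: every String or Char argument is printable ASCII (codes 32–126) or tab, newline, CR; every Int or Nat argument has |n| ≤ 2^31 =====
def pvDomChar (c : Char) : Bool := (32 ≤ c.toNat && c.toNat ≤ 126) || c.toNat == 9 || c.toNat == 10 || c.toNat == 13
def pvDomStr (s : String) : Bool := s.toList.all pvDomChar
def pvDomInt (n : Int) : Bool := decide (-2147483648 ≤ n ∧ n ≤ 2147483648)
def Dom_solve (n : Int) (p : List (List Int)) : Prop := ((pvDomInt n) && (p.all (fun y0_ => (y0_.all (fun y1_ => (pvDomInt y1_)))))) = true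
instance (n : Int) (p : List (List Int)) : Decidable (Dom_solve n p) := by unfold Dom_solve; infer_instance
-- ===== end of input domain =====

-- B replaces A's dict-of-groups + key-order list + per-group reverse sorts by ONE stable
-- composite-key sort (first asc, second desc) of the first n rows of the sorted list:
-- simpler, same O(n log n) cost.  Both A and B sort the argument list in place (p.sort());
-- the theorems below are about the RETURN value.

-- shared projection helpers: row[0] and row[1] (Python p[i][0], p[i][1])
def k1 (r : List Int) : Int := PySem.List.pyGetD r 0 0
def k2 (r : List Int) : Int := PySem.List.pyGetD r 1 0

-- ===== PORT A =====
-- loop body of A's first for-loop: dict1.get(x,0)==0 tests key absence (stored values are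
-- lists, never 0), curr.append is re-insertion of the grown list; y = p[i][1] is unused.
def stepA (st : PySem.Dict Int (List (List Int)) × List Int) (row : List Int) :
    PySem.Dict Int (List (List Int)) × List Int :=
  match PySem.Dict.get? st.1 (k1 row) with
  | none => (st.1.insert (k1 row) [row], st.2 ++ [k1 row])
  | some curr => (st.1.insert (k1 row) (curr ++ [row]), st.2)

-- pyGetD with default is justified by Pre_solve (indices in range there)
def solve (n : Int) (p : List (List Int)) : List (List Int) :=
  let ps := PySem.List.sorted p (fun x => x)          -- p.sort()
  let st := (PySem.List.pyRange 0 n).foldl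
    (fun st i => stepA st (PySem.List.pyGetD ps i [])) (PySem.Dict.empty, [])
  st.2.foldl
    (fun ans z => ans ++ PySem.List.sorted (PySem.Dict.getD st.1 z []) k2 true) []

-- ===== PORT B =====
def solve_alt (n : Int) (p : List (List Int)) : List (List Int) :=
  PySem.List.sorted2
    (PySem.List.slice (PySem.List.sorted p (fun x => x)) none (some (max n 0)))  -- p.sort(); p[:max(n,0)]
    k1 (fun e => -(k2 e))                                                        -- key=(e[0], -e[1])

-- ===== PRECONDITION & SPEC =====
-- Pre_ is exactly where A returns normally: n ≤ len(p) (else p[i] raises IndexError) and each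
-- of the n lexicographically smallest rows has at least 2 entries (else p[i][0] or p[i][1]
-- raises IndexError); for n ≤ 0 A's loop runs zero times, so nothing more is required.
def Pre_solve (n : Int) (p : List (List Int)) : Prop :=
  n ≤ p.length ∧ ∀ r ∈ (PySem.List.sorted p (fun x => x)).take n.toNat, 2 ≤ r.length
instance (n : Int) (p : List (List Int)) : Decidable (Pre_solve n p) := by
  unfold Pre_solve; infer_instance

def pvWitness_solve : Int × List (List Int) := (3, [[1, 2], [1, 5], [0, 7]])

def Spec_solve (n : Int) (p : List (List Int)) (out : List (List Int)) : Prop := out = solve_alt n p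
instance (n : Int) (p : List (List Int)) (out : List (List Int)) : Decidable (Spec_solve n p out) := by unfold Spec_solve; infer_instance

-- ===== CLAIM (what is proved, stated in full; the proofs are below) =====
def Claim_equal_solve : Prop := ∀ (n : Int) (p : List (List Int)), Dom_solve n p → Pre_solve n p → Spec_solve n p (solve n p)

-- ===== LEMMAS AND PROOFS =====

theorem insertBy_pairwise {α : Type} (before : α → α → Bool)
    (hasym : ∀ a b, before a b = true → before b a = false)
    (htr : ∀ a b c, before b a = false → before c b = false → before c a = false)
    (x : α) (ys : List α) (h : ys.Pairwise (fun a b => before b a = false)) :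
    (PySem.List.insertBy before x ys).Pairwise (fun a b => before b a = false) := by
  induction ys with
  | nil => simp [PySem.List.insertBy]
  | cons y t ih =>
    rcases List.pairwise_cons.mp h with ⟨hy, ht⟩
    by_cases hxy : before x y = true
    · simp only [PySem.List.insertBy, hxy, if_pos]
      refine List.pairwise_cons.mpr ⟨?_, h⟩
      intro z hz
      rcases List.mem_cons.mp hz with rfl | hz
      · exact hasym x z hxy
      · exact htr x y z (hasym x y hxy) (hy z hz)
    · simp only [PySem.List.insertBy, hxy, if_neg, Bool.not_eq_true]
      refine List.pairwise_cons.mpr ⟨?_, ih ht⟩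
      intro z hz
      rcases (PySem.List.mem_insertBy before x z t).mp hz with rfl | hz
      · simpa using hxy
      · exact hy z hz

theorem foldl_insertBy_pairwise {α : Type} (before : α → α → Bool)
    (hasym : ∀ a b, before a b = true → before b a = false)
    (htr : ∀ a b c, before b a = false → before c b = false → before c a = false)
    (xs : List α) :
    (xs.foldl (fun acc x => PySem.List.insertBy before x acc) []).Pairwise
      (fun a b => before b a = false) := by
  have : ∀ (init : List α), init.Pairwise (fun a b => before b a = false) →
      (xs.foldl (fun acc x => PySem.List.insertBy before x acc) init).Pairwise
        (fun a b => before b a = false) := by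
    induction xs with
    | nil => intro init h; simpa using h
    | cons x t ih =>
      intro init h
      exact ih _ (insertBy_pairwise before hasym htr x init h)
  exact this [] (by simp)

theorem insertBy_congr {α : Type} (b₁ b₂ : α → α → Bool) (x : α) (ys : List α)
    (h : ∀ y ∈ ys, b₁ x y = b₂ x y) :
    PySem.List.insertBy b₁ x ys = PySem.List.insertBy b₂ x ys := by
  induction ys with
  | nil => rfl
  | cons y t ih =>
    have hy : b₁ x y = b₂ x y := h y (by simp)
    simp only [PySem.List.insertBy, hy]
    split
    · rfl
    · rw [ih (fun z hz => h z (by simp [hz]))]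

theorem foldl_insertBy_congr {α : Type} (b₁ b₂ : α → α → Bool) (s : List α) :
    ∀ (xs init : List α),
    (∀ a ∈ s, ∀ b ∈ s, b₁ a b = b₂ a b) →
    (∀ x ∈ xs, x ∈ s) → (∀ y ∈ init, y ∈ s) →
    xs.foldl (fun acc x => PySem.List.insertBy b₁ x acc) init
      = xs.foldl (fun acc x => PySem.List.insertBy b₂ x acc) init := by
  intro xs
  induction xs with
  | nil => intro init _ _ _; rfl
  | cons x t ih =>
    intro init hb hxs hinit
    have hxmem : x ∈ s := hxs x (by simp)
    simp only [List.foldl_cons]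
    rw [insertBy_congr b₁ b₂ x init (fun y hy => hb x hxmem y (hinit y hy))]
    exact ih _ hb (fun z hz => hxs z (by simp [hz]))
      (fun y hy => by
        rcases (PySem.List.mem_insertBy b₂ x y init).mp hy with rfl | hy
        · exact hxmem
        · exact hinit y hy)

theorem insertBy_append_left {α : Type} (before : α → α → Bool) (x : α) (S T : List α)
    (h : ∀ y ∈ S, before x y = false) :
    PySem.List.insertBy before x (S ++ T) = S ++ PySem.List.insertBy before x T := by
  induction S with
  | nil => rfl
  | cons y t ih =>
    have hy : before x y = false := h y (by simp)
    simp only [List.cons_append, PySem.List.insertBy, hy]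
    simp only [Bool.false_eq_true, ite_false]
    rw [ih (fun z hz => h z (by simp [hz]))]

theorem foldl_insertBy_append {α : Type} (before : α → α → Bool) (bs S : List α)
    (h : ∀ b ∈ bs, ∀ y ∈ S, before b y = false) :
    ∀ (T : List α),
    bs.foldl (fun acc x => PySem.List.insertBy before x acc) (S ++ T)
      = S ++ bs.foldl (fun acc x => PySem.List.insertBy before x acc) T := by
  induction bs with
  | nil => intro T; rfl
  | cons b t ih =>
    intro T
    simp only [List.foldl_cons]
    rw [insertBy_append_left before b S T (h b (by simp))]
    exact ih (fun b' hb' => h b' (by simp [hb'])) _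

theorem sorted2_eq_foldl (xs : List (List Int)) (f g : List Int → Int) :
    PySem.List.sorted2 xs f g
      = xs.foldl (fun acc x => PySem.List.insertBy
          (fun a b => decide (f a < f b) || (!decide (f b < f a) && decide (g a < g b))) x acc) [] := rfl

theorem sorted2_append (as bs : List (List Int)) (f g : List Int → Int)
    (h : ∀ a ∈ as, ∀ b ∈ bs, f a < f b) :
    PySem.List.sorted2 (as ++ bs) f g
      = PySem.List.sorted2 as f g ++ PySem.List.sorted2 bs f g := by
  have hS : ∀ b ∈ bs, ∀ y ∈ PySem.List.sorted2 as f g,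
      (fun a b => decide (f a < f b) || (!decide (f b < f a) && decide (g a < g b))) b y = false := by
    intro b hb y hy
    have hy' : y ∈ as := ((PySem.List.sorted2_perm as f g false).mem_iff).mp hy
    have hfy : f y < f b := h y hy' b hb
    simp [hfy, not_lt_of_gt hfy]
  rw [sorted2_eq_foldl, List.foldl_append, ← sorted2_eq_foldl,
    show PySem.List.sorted2 as f g = PySem.List.sorted2 as f g ++ [] by simp,
    foldl_insertBy_append _ bs _ hS [], ← sorted2_eq_foldl]
  simp

theorem sorted2_const_first (gl : List (List Int)) (c : Int) (f g : List Int → Int)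
    (hc : ∀ r ∈ gl, f r = c) :
    PySem.List.sorted2 gl f g = PySem.List.sorted gl g := by
  rw [sorted2_eq_foldl, PySem.List.sorted_eq_foldl_insertBy]
  refine foldl_insertBy_congr _ _ gl gl [] ?_ (fun x hx => hx) (by simp)
  intro a ha b hb
  simp [hc a ha, hc b hb]

theorem sorted_neg_eq_rev (gl : List (List Int)) (g : List Int → Int) :
    PySem.List.sorted gl (fun r => -(g r)) = PySem.List.sorted gl g true := by
  rw [PySem.List.sorted_eq_foldl_insertBy, PySem.List.sorted_rev_eq_foldl_insertBy]
  congr 1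
  funext acc x
  congr 1
  funext a b
  simp

theorem foldl_add_cons (c : Int) (s l : List Int) (hc : c ∉ l) :
    l.foldl PySem.Set.add (c :: s) = c :: l.foldl PySem.Set.add s := by
  induction l generalizing s with
  | nil => rfl
  | cons x t ih =>
    have hxc : x ≠ c := fun h => hc (by simp [h])
    have hnot : c ∉ t := fun h => hc (by simp [h])
    simp only [List.foldl_cons]
    rw [show PySem.Set.add (c :: s) x = c :: PySem.Set.add s x by
      simp only [PySem.Set.add, PySem.Set.contains, List.contains_cons]
      rw [show (x == c) = false by simpa using hxc]
      simp only [Bool.false_or]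
      split <;> simp]
    exact ih _ hnot

theorem foldl_add_all_eq (l : List Int) (c : Int) (h : ∀ x ∈ l, x = c) :
    l.foldl PySem.Set.add [c] = [c] := by
  induction l with
  | nil => rfl
  | cons x t ih =>
    have hx : x = c := h x (by simp)
    subst hx
    simp only [List.foldl_cons]
    rw [show PySem.Set.add [x] x = [x] by simp [PySem.Set.add, PySem.Set.contains]]
    exact ih (fun y hy => h y (by simp [hy]))

theorem dedup_run (l₁ l₂ : List Int) (c : Int) (h₁ : l₁ ≠ []) (hall : ∀ x ∈ l₁, x = c)
    (hc : c ∉ l₂) :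
    PySem.List.dedup (l₁ ++ l₂) = c :: PySem.List.dedup l₂ := by
  rw [PySem.List.dedup_eq_ofList, PySem.Set.ofList_eq_foldl, List.foldl_append]
  have h1 : l₁.foldl PySem.Set.add [] = [c] := by
    cases l₁ with
    | nil => exact absurd rfl h₁
    | cons x t =>
      have hx : x = c := hall x (by simp)
      subst hx
      simp only [List.foldl_cons]
      rw [show PySem.Set.add [] x = [x] from rfl]
      exact foldl_add_all_eq t x (fun y hy => hall y (by simp [hy]))
  rw [h1, show [c] = c :: ([] : List Int) from rfl, foldl_add_cons c [] l₂ hc,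
    ← PySem.Set.ofList_eq_foldl, ← PySem.List.dedup_eq_ofList]

theorem foldA_char (q : List (List Int)) : ∀ (u : List (List Int))
    (d : PySem.Dict Int (List (List Int))) (ord : List Int),
    ord = PySem.List.dedup (u.map k1) →
    (∀ c, d.get? c = if c ∈ u.map k1 then some (u.filter (fun r => k1 r == c)) else none) →
    (q.foldl stepA (d, ord)).2 = PySem.List.dedup ((u ++ q).map k1) ∧
    ∀ c, (q.foldl stepA (d, ord)).1.get? c
        = if c ∈ (u ++ q).map k1 then some ((u ++ q).filter (fun r => k1 r == c)) else none := by
  induction q with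
  | nil =>
    intro u d ord h1 h2
    simp only [List.foldl_nil, List.append_nil]
    exact ⟨h1, h2⟩
  | cons r t ih =>
    intro u d ord h1 h2
    simp only [List.foldl_cons]
    have hstep : stepA (d, ord) r
        = (if (k1 r) ∈ u.map k1
            then (d.insert (k1 r) ((u.filter (fun r' => k1 r' == k1 r)) ++ [r]), ord)
            else (d.insert (k1 r) [r], ord ++ [k1 r])) := by
      by_cases hm : (k1 r) ∈ u.map k1
      · simp only [stepA, h2 (k1 r), hm, if_pos]
      · simp only [stepA, h2 (k1 r), hm, if_false]
    have key : ∀ (d' : PySem.Dict Int (List (List Int))) (ord' : List Int),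
        ord' = PySem.List.dedup ((u ++ [r]).map k1) →
        (∀ c, d'.get? c = if c ∈ (u ++ [r]).map k1
            then some ((u ++ [r]).filter (fun r' => k1 r' == c)) else none) →
        (t.foldl stepA (d', ord')).2 = PySem.List.dedup ((u ++ r :: t).map k1) ∧
        ∀ c, (t.foldl stepA (d', ord')).1.get? c
            = if c ∈ (u ++ r :: t).map k1
              then some ((u ++ r :: t).filter (fun r' => k1 r' == c)) else none := by
      intro d' ord' h1' h2'
      have := ih (u ++ [r]) d' ord' h1' h2'
      simpa [List.append_assoc] using this
    rw [hstep]
    by_cases hm : (k1 r) ∈ u.map k1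
    · rw [if_pos hm]
      refine key _ _ ?_ ?_
      · rw [h1]
        rw [PySem.List.dedup_eq_ofList, PySem.List.dedup_eq_ofList, List.map_append,
          PySem.Set.ofList_eq_foldl, PySem.Set.ofList_eq_foldl, List.foldl_append]
        simp only [List.map_cons, List.map_nil, List.foldl_cons, List.foldl_nil]
        rw [show PySem.Set.add (List.foldl PySem.Set.add [] (u.map k1)) (k1 r)
            = List.foldl PySem.Set.add [] (u.map k1) by
          simp only [PySem.Set.add]
          rw [if_pos]
          rw [show (List.foldl PySem.Set.add [] (u.map k1)).contains (k1 r)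
              = ((k1 r) ∈ List.foldl PySem.Set.add [] (u.map k1) : Bool) by simp]
          rw [← PySem.Set.ofList_eq_foldl]
          simpa using (PySem.Set.mem_ofList (u.map k1) (k1 r)).mpr hm]
      · intro c
        by_cases hc : c = k1 r
        · subst hc
          rw [PySem.Dict.get?_insert_self]
          rw [if_pos (by simp [hm])]
          simp
        · rw [PySem.Dict.get?_insert_of_ne _ _ hc, h2 c]
          have hfil : (u ++ [r]).filter (fun r' => k1 r' == c) = u.filter (fun r' => k1 r' == c) := by
            simp only [List.filter_append, List.filter_cons, List.filter_nil]
            rw [show (k1 r == c) = false by simpa using fun h => hc h.symm]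
            simp
          have hmem : (c ∈ (u ++ [r]).map k1) ↔ (c ∈ u.map k1) := by
            simp [hc]
          by_cases hcu : c ∈ u.map k1
          · rw [if_pos hcu, if_pos (hmem.mpr hcu), hfil]
          · rw [if_neg hcu, if_neg (fun h => hcu (hmem.mp h))]
    · rw [if_neg hm]
      refine key _ _ ?_ ?_
      · rw [h1, List.map_append]
        rw [PySem.List.dedup_eq_ofList, PySem.List.dedup_eq_ofList,
          PySem.Set.ofList_eq_foldl, PySem.Set.ofList_eq_foldl, List.foldl_append]
        simp only [List.map_cons, List.map_nil, List.foldl_cons, List.foldl_nil]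
        simp only [PySem.Set.add]
        rw [if_neg]
        rw [show (List.foldl PySem.Set.add [] (u.map k1)).contains (k1 r)
            = ((k1 r) ∈ List.foldl PySem.Set.add [] (u.map k1) : Bool) by simp]
        rw [← PySem.Set.ofList_eq_foldl]
        simpa using fun h => hm ((PySem.Set.mem_ofList (u.map k1) (k1 r)).mp h)
      · intro c
        by_cases hc : c = k1 r
        · subst hc
          rw [PySem.Dict.get?_insert_self, if_pos (by simp)]
          have hficti : u.filter (fun r' => k1 r' == k1 r) = [] := by
            rw [List.filter_eq_nil_iff]
            intro a ha hk
            exact hm (List.mem_map.mpr ⟨a, ha, by simpa using hk⟩)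
          simp [List.filter_append, hficti]
        · rw [PySem.Dict.get?_insert_of_ne _ _ hc, h2 c]
          have hfil : (u ++ [r]).filter (fun r' => k1 r' == c) = u.filter (fun r' => k1 r' == c) := by
            simp only [List.filter_append, List.filter_cons, List.filter_nil]
            rw [show (k1 r == c) = false by simpa using fun h => hc h.symm]
            simp
          have hmem : (c ∈ (u ++ [r]).map k1) ↔ (c ∈ u.map k1) := by
            simp [hc]
          by_cases hcu : c ∈ u.map k1
          · rw [if_pos hcu, if_pos (hmem.mpr hcu), hfil]
          · rw [if_neg hcu, if_neg (fun h => hcu (hmem.mp h))]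

theorem pairwise_k1_take (p : List (List Int)) (m : Nat)
    (hrows : ∀ r ∈ (PySem.List.sorted p (fun x => x)).take m, r ≠ []) :
    ((PySem.List.sorted p (fun x => x)).take m).Pairwise (fun a b => k1 a ≤ k1 b) := by
  have hasym : ∀ a b : List Int, decide (a < b) = true → decide (b < a) = false := by
    intro a b h
    simp only [decide_eq_true_eq] at h
    simpa using List.lt_asymm h
  have htr : ∀ a b c : List Int, decide (b < a) = false → decide (c < b) = false →
      decide (c < a) = false := by
    intro a b c h1 h2
    simp only [decide_eq_false_iff_not] at *
    rw [List.not_lt] at *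
    exact List.le_trans h1 h2
  have hp : (PySem.List.sorted p (fun x => x)).Pairwise
      (fun a b : List Int => decide (b < a) = false) := by
    rw [PySem.List.sorted_eq_foldl_insertBy]
    exact foldl_insertBy_pairwise _ hasym htr p
  have hpt := List.Pairwise.sublist (List.take_sublist m _) hp
  refine hpt.imp_of_mem ?_
  intro a b ha hb hr
  have ha' : a ≠ [] := hrows a ha
  have hb' : b ≠ [] := hrows b hb
  simp only [decide_eq_false_iff_not] at hr
  by_contra hlt
  replace hlt : k1 b < k1 a := lt_of_not_ge hlt
  apply hr
  match a, ha', b, hb' with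
  | x :: xs, _, y :: ys, _ =>
    have hx : k1 (x :: xs) = x := by simp [k1, PySem.List.pyGetD]
    have hy : k1 (y :: ys) = y := by simp [k1, PySem.List.pyGetD]
    rw [hx, hy] at hlt
    exact List.cons_lt_cons_iff.mpr (Or.inl hlt)

theorem solve_eq_flatMap (q : List (List Int)) :
    ((q.foldl stepA (PySem.Dict.empty, [])).2.foldl
      (fun ans z => ans ++ PySem.List.sorted
        (PySem.Dict.getD (q.foldl stepA (PySem.Dict.empty, [])).1 z []) k2 true) [])
      = (PySem.List.dedup (q.map k1)).flatMap
          (fun c => PySem.List.sorted (q.filter (fun r => k1 r == c)) k2 true) := by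
  obtain ⟨h2, h1⟩ := foldA_char q [] PySem.Dict.empty [] (by rfl) (by intro c; simp)
  simp only [List.nil_append] at h2 h1
  rw [h2]
  rw [PySem.List.foldl_congr_mem _ _
    (fun ans z => ans ++ PySem.List.sorted (q.filter (fun r => k1 r == z)) k2 true) [] ?_]
  · exact PySem.List.foldl_append_eq_flatMap _ _ []
  · intro acc z hz
    have hzm : z ∈ q.map k1 := by
      rw [PySem.List.dedup_eq_ofList] at hz
      exact (PySem.Set.mem_ofList _ z).mp hz
    have := h1 z
    rw [if_pos hzm] at this
    rw [PySem.Dict.getD, this]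
    rfl

theorem dropWhile_head_false {α : Type} (p : α → Bool) :
    ∀ (l : List α) {b0 : α} {rs : List α}, List.dropWhile p l = b0 :: rs → p b0 = false := by
  intro l
  induction l with
  | nil => intro b0 rs h; simp at h
  | cons x xs ih =>
    intro b0 rs h
    rw [List.dropWhile_cons] at h
    by_cases hx : p x = true
    · rw [if_pos hx] at h; exact ih h
    · rw [if_neg hx] at h
      cases h
      simpa using hx

theorem main_runs (N : Nat) : ∀ (q : List (List Int)), q.length ≤ N →
    q.Pairwise (fun a b => k1 a ≤ k1 b) →
    PySem.List.sorted2 q k1 (fun e => -(k2 e))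
      = (PySem.List.dedup (q.map k1)).flatMap
          (fun c => PySem.List.sorted (q.filter (fun r => k1 r == c)) k2 true) := by
  induction N with
  | zero =>
    intro q hq _
    have : q = [] := List.length_eq_zero_iff.mp (Nat.le_zero.mp hq)
    subst this
    rfl
  | succ N ih =>
    intro q hq hpw
    cases q with
    | nil => rfl
    | cons r t =>
      set c := k1 r with hc
      set g := (r :: t).takeWhile (fun x => k1 x == c) with hg
      set rest := (r :: t).dropWhile (fun x => k1 x == c) with hrest
      have hgr : g ++ rest = r :: t := List.takeWhile_append_dropWhile
      have hg_all : ∀ a ∈ g, k1 a = c := by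
        intro a ha
        simpa using List.mem_takeWhile_imp ha
      have hg_cons : g = r :: t.takeWhile (fun x => k1 x == c) := by
        rw [hg, List.takeWhile_cons_of_pos (by simp [← hc])]
      have hrest_t : rest = t.dropWhile (fun x => k1 x == c) := by
        rw [hrest, List.dropWhile_cons_of_pos (by simp [← hc])]
      have hrest_len : rest.length ≤ N := by
        have := (List.dropWhile_sublist (l := t) (fun x => k1 x == c)).length_le
        rw [hrest_t]
        simpa using Nat.le_trans this (Nat.lt_succ_iff.mp (by simpa using hq))
      have hrest_sub : rest.Sublist (r :: t) := by
        rw [hrest]; exact List.dropWhile_sublist _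
      have hrest_pw : rest.Pairwise (fun a b => k1 a ≤ k1 b) := List.Pairwise.sublist hrest_sub hpw
      have hc_le : ∀ b ∈ rest, c ≤ k1 b := by
        intro b hb
        have hb' : b ∈ r :: t := hrest_sub.mem hb
        rcases List.mem_cons.mp hb' with rfl | hb'
        · exact le_refl _
        · exact (List.pairwise_cons.mp hpw).1 b hb'
      have hgt : ∀ b ∈ rest, c < k1 b := by
        cases hrl : rest with
        | nil => intro b hb; simp at hb
        | cons b0 rs =>
          have hb0 : ¬ (k1 b0 == c) = true := by
            have := dropWhile_head_false (fun x => k1 x == c) (r :: t) (hrest ▸ hrl)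
            simpa using this
          have hb0lt : c < k1 b0 := by
            have := hc_le b0 (by rw [hrl]; simp)
            rcases lt_or_eq_of_le this with h | h
            · exact h
            · exact absurd (by simpa using h.symm) hb0
          intro b hb
          rcases List.mem_cons.mp hb with rfl | hb
          · exact hb0lt
          · have : k1 b0 ≤ k1 b := by
              have hpw' := hrest_pw
              rw [hrl] at hpw'
              exact (List.pairwise_cons.mp hpw').1 b hb
            exact lt_of_lt_of_le hb0lt this
      have hfil_g : (r :: t).filter (fun x => k1 x == c) = g := by
        conv_lhs => rw [← hgr]
        rw [List.filter_append]
        rw [List.filter_eq_self.mpr (by intro a ha; simpa using hg_all a ha)]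
        rw [List.filter_eq_nil_iff.mpr (by intro b hb; simpa using ne_of_gt (hgt b hb))]
        simp
      have hg_ne : g ≠ [] := by rw [hg_cons]; simp
      have hmap_run : PySem.List.dedup ((r :: t).map k1) = c :: PySem.List.dedup (rest.map k1) := by
        conv_lhs => rw [← hgr]
        rw [List.map_append]
        refine dedup_run _ _ c (by simpa using hg_ne) ?_ ?_
        · intro x hx
          rcases List.mem_map.mp hx with ⟨a, ha, rfl⟩
          exact hg_all a ha
        · intro hcm
          rcases List.mem_map.mp hcm with ⟨b, hb, hbc⟩
          exact absurd hbc (ne_of_gt (hgt b hb))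
      have hsplit : PySem.List.sorted2 (r :: t) k1 (fun e => -(k2 e))
          = PySem.List.sorted g k2 true ++ PySem.List.sorted2 rest k1 (fun e => -(k2 e)) := by
        conv_lhs => rw [← hgr]
        rw [sorted2_append _ _ _ _ (by intro a ha b hb; rw [hg_all a ha]; exact hgt b hb)]
        rw [sorted2_const_first g c _ _ hg_all, sorted_neg_eq_rev]
      rw [hsplit, hmap_run, List.flatMap_cons, hfil_g,
        ih rest hrest_len hrest_pw]
      congr 1
      unfold List.flatMap
      congr 1
      refine List.map_congr_left ?_
      intro c' hc'
      have hc'm : c' ∈ rest.map k1 := by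
        rw [PySem.List.dedup_eq_ofList] at hc'
        exact (PySem.Set.mem_ofList _ c').mp hc'
      rcases List.mem_map.mp hc'm with ⟨b, hb, rfl⟩
      have hne : c ≠ k1 b := ne_of_lt (hgt b hb)
      congr 1
      conv_rhs => rw [← hgr]
      rw [List.filter_append]
      rw [show List.filter (fun x => k1 x == k1 b) g = [] from List.filter_eq_nil_iff.mpr (by
        intro a ha
        rw [show k1 a = c from hg_all a ha]
        simpa using hne)]
      simp

theorem solve_main (n : Int) (p : List (List Int)) (hnlen : n ≤ p.length)
    (hrows : ∀ r ∈ (PySem.List.sorted p (fun x => x)).take n.toNat, 2 ≤ r.length) :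
    solve n p = solve_alt n p := by
  set ps := PySem.List.sorted p (fun x => x) with hps
  have hlenps : ps.length = p.length := PySem.List.length_sorted p _ false
  set q := ps.take n.toNat with hq
  have hql : q.length = n.toNat := by
    rw [hq, List.length_take, hlenps]
    omega
  have hqlen : (PySem.List.len q) = max n 0 := by
    simp only [PySem.List.len, hql]
    omega
  -- B side: the slice is q
  have hslice : PySem.List.slice ps none (some (max n 0)) = q := by
    rw [PySem.List.slice_to ps (le_max_right n 0),
      show (max n 0).toNat = n.toNat by omega]
  -- A side: index loop over range(n) = row loop over q
  have hrange : PySem.List.pyRange 0 n = PySem.List.pyRange 0 (PySem.List.len q) := by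
    rw [hqlen]
    by_cases h : 0 ≤ n
    · rw [max_eq_left h]
    · rw [max_eq_right (le_of_not_ge h),
        show PySem.List.pyRange 0 n = [] by simp [PySem.List.pyRange]; omega]
      rfl
  have hgets : ∀ (st : PySem.Dict Int (List (List Int)) × List Int),
      ∀ i ∈ PySem.List.pyRange 0 (PySem.List.len q),
      stepA st (PySem.List.pyGetD ps i []) = stepA st (PySem.List.pyGetD q i []) := by
    intro st i hi
    rcases PySem.List.mem_pyRange_one.mp hi with ⟨h0, h1⟩
    rw [PySem.List.len] at h1
    have hqle : q.length ≤ ps.length := by rw [hq]; simp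
    have hlt : i < (q.length : Int) := h1
    have hlt' : i < (ps.length : Int) := by omega
    rw [PySem.List.pyGetD_eq_getElem q [] h0 hlt, PySem.List.pyGetD_eq_getElem ps [] h0 hlt']
    congr 1
    exact (List.getElem_take).symm
  have hfold : (PySem.List.pyRange 0 n).foldl
      (fun st i => stepA st (PySem.List.pyGetD ps i [])) (PySem.Dict.empty, [])
      = q.foldl stepA (PySem.Dict.empty, []) := by
    rw [hrange]
    rw [PySem.List.foldl_congr_mem _ _
      (fun st i => stepA st (PySem.List.pyGetD q i [])) (PySem.Dict.empty, []) hgets]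
    have := PySem.List.foldl_pyRange_pyGetD q [] stepA
      ((PySem.Dict.empty : PySem.Dict Int (List (List Int))), ([] : List Int)) (a := 0) le_rfl
    simpa using this
  have hA : solve n p = ((q.foldl stepA (PySem.Dict.empty, [])).2.foldl
      (fun ans z => ans ++ PySem.List.sorted
        (PySem.Dict.getD (q.foldl stepA (PySem.Dict.empty, [])).1 z []) k2 true) []) := by
    show ((PySem.List.pyRange 0 n).foldl
        (fun st i => stepA st (PySem.List.pyGetD ps i [])) (PySem.Dict.empty, [])).2.foldl
      (fun ans z => ans ++ PySem.List.sorted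
        (PySem.Dict.getD ((PySem.List.pyRange 0 n).foldl
          (fun st i => stepA st (PySem.List.pyGetD ps i [])) (PySem.Dict.empty, [])).1 z []) k2 true) [] = _
    rw [hfold]
  have hB : solve_alt n p = PySem.List.sorted2 q k1 (fun e => -(k2 e)) := by
    show PySem.List.sorted2 (PySem.List.slice ps none (some (max n 0))) k1 (fun e => -(k2 e)) = _
    rw [hslice]
  have hpw : q.Pairwise (fun a b => k1 a ≤ k1 b) :=
    pairwise_k1_take p n.toNat (by
      intro r hr
      have := hrows r hr
      intro hnil
      rw [hnil] at this
      simp at this)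
  rw [hA, solve_eq_flatMap q, hB, main_runs q.length q le_rfl hpw]

-- ===== VERDICT (by name: the statement is the Claim_ definition above) =====
theorem solve_spec : Claim_equal_solve := by
  intro n p _ hpre
  obtain ⟨h1, h2⟩ := hpre
  exact solve_main n p h1 h2
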